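-- pv_equiv track=rewrite | github.com/TomasMrkva/advent-of-code-2023 | day03/d3ptB.py | generate_num_dict
-- ===== SOURCE A (Python) =====
-- def generate_num_dict(grid):
--     d = {}
--     for r_i, row in enumerate(grid):
--         c_i = 0
--         while c_i < len(row):
--             if str.isdigit(row[c_i]):
--                 num = ""
--                 j = c_i
--                 while j < len(row) and str.isdigit(row[j]):
--                     num += row[j]
--                     j += 1
--                 for c_ii in range(c_i, j):
--                     d[(r_i, c_ii)] = int(num)
--                 c_i += len(num)
--             c_i += 1
--     return d
-- ===== SOURCE B (Python) =====
-- from itertools import groupby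
--
-- def generate_num_dict(grid):
--     d = {}
--     for r_i, row in enumerate(grid):
--         col = 0
--         for isdig, grp in groupby(row, key=str.isdigit):
--             chars = list(grp)
--             if isdig:
--                 val = int(''.join(chars))
--                 for k in range(len(chars)):
--                     d[(r_i, col + k)] = val
--             col += len(chars)
--     return d
-- ===== Notes on version B (the rewrite author's own statement) =====
-- stated objective: idiomatic
-- what changed: Replaces the manual index-driven while-scan (with its inner digit-collecting while loop and index jumping) by itertools.groupby over each row keyed on str.isdigit, processing maximal runs with a running column counter.
import Mathlib
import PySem

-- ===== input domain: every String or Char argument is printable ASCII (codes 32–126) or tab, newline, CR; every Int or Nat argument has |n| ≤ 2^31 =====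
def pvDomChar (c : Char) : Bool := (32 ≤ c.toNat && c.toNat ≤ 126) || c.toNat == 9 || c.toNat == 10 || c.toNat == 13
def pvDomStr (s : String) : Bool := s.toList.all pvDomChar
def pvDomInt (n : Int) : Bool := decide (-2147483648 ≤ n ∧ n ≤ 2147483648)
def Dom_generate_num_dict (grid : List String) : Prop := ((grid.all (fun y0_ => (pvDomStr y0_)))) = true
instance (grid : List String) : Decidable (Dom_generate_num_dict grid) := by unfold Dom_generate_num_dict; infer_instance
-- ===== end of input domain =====

-- B replaces A's index-driven while-scan by a groupby over maximal digit runs (idiomatic decomposition, same cost).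
-- A mutates nothing; keys (r_i, c_ii) are always fresh, so the dict is a plain append-ordered list of (r, c, value).

-- ===== PORT A =====
-- inner while: 'while j < len(row) and str.isdigit(row[j]): num += row[j]; j += 1'
def gndInner (row : List Char) (j : Nat) (num : List Char) : List Char × Nat :=
  if h : j < row.length then
    if PySem.Chars.isdigit row[j] then gndInner row (j + 1) (num ++ [row[j]]) else (num, j)
  else (num, j)
termination_by row.length - j

-- outer while over c_i; 'int(num)' is exact here since num is a nonempty run of ASCII digits, so int() cannot raise
def gndLoop (row : List Char) (r_i : Int) (c_i : Nat) (d : List (Int × Int × Int)) : List (Int × Int × Int) :=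
  if h : c_i < row.length then
    if PySem.Chars.isdigit row[c_i] then
      let p := gndInner row c_i []
      let v := (PySem.Int.ofChars? p.1).getD 0
      let d' := (List.range' c_i (p.2 - c_i)).foldl (fun acc c_ii => acc ++ [(r_i, ((c_ii : Int)), v)]) d
      gndLoop row r_i (c_i + p.1.length + 1) d'
    else gndLoop row r_i (c_i + 1) d
  else d
termination_by row.length - c_i

def generate_num_dict (grid : List String) : List (Int × Int × Int) :=
  (PySem.List.enumerate grid).foldl (fun d p => gndLoop p.2.toList p.1 0 d) []

-- ===== PORT B =====
-- itertools.groupby(row, key=str.isdigit): maximal runs with their key value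
def gndGroups (cs : List Char) : List (Bool × List Char) :=
  match cs with
  | [] => []
  | c :: rest =>
    let k := PySem.Chars.isdigit c
    (k, c :: rest.takeWhile (fun x => PySem.Chars.isdigit x == k)) ::
      gndGroups (rest.dropWhile (fun x => PySem.Chars.isdigit x == k))
termination_by cs.length
decreasing_by simp; exact List.length_dropWhile_le _ _

-- per row: 'for isdig, grp in groupby(...)' with the running column counter
def gndRowB (r_i : Int) (gs : List (Bool × List Char)) (col : Nat) (d : List (Int × Int × Int)) : List (Int × Int × Int) :=
  match gs with
  | [] => d
  | (isdig, chars) :: gs' =>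
    let d' := if isdig then
        let v := (PySem.Int.ofChars? chars).getD 0
        (List.range chars.length).foldl (fun acc k => acc ++ [(r_i, (((col + k : Nat) : Int)), v)]) d
      else d
    gndRowB r_i gs' (col + chars.length) d'

def generate_num_dict_alt (grid : List String) : List (Int × Int × Int) :=
  (PySem.List.enumerate grid).foldl (fun d p => gndRowB p.1 (gndGroups p.2.toList) 0 d) []

-- ===== PRECONDITION & SPEC =====
def Spec_generate_num_dict (grid : List String) (out : List (Int × Int × Int)) : Prop := out = generate_num_dict_alt grid
instance (grid : List String) (out : List (Int × Int × Int)) : Decidable (Spec_generate_num_dict grid out) := by unfold Spec_generate_num_dict; infer_instance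

-- ===== CLAIM (what is proved, stated in full; the proofs are below) =====
def Claim_equal_generate_num_dict : Prop := ∀ (grid : List String), Dom_generate_num_dict grid → Spec_generate_num_dict grid (generate_num_dict grid)


-- ===== LEMMAS AND PROOFS =====

theorem beq_true_eq (b : Bool) : (b == true) = b := by cases b <;> rfl

theorem gndInner_eq_fuel (row : List Char) : ∀ (n j : Nat), row.length - j ≤ n → ∀ num,
    gndInner row j num =
      (num ++ (row.drop j).takeWhile PySem.Chars.isdigit,
       j + ((row.drop j).takeWhile PySem.Chars.isdigit).length) := by
  intro n
  induction n with
  | zero =>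
    intro j h num
    have hj : ¬ j < row.length := by omega
    rw [gndInner]
    simp [hj, List.drop_eq_nil_of_le (by omega : row.length ≤ j)]
  | succ n ih =>
    intro j h num
    by_cases hj : j < row.length
    · have hdrop : row.drop j = row[j] :: row.drop (j + 1) := List.drop_eq_getElem_cons hj
      rw [gndInner]
      by_cases hd : PySem.Chars.isdigit row[j]
      · simp only [dif_pos hj, if_pos hd]
        rw [ih (j + 1) (by omega) (num ++ [row[j]])]
        rw [hdrop, List.takeWhile_cons, if_pos hd]
        simp only [Prod.mk.injEq, List.append_assoc, List.singleton_append, List.length_cons]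
        exact ⟨by trivial, by omega⟩
      · simp only [dif_pos hj, if_neg hd]
        rw [hdrop, List.takeWhile_cons, if_neg hd]
        simp
    · rw [gndInner]
      simp [hj, List.drop_eq_nil_of_le (by omega : row.length ≤ j)]

theorem gndInner_eq (row : List Char) (j : Nat) (num : List Char) :
    gndInner row j num =
      (num ++ (row.drop j).takeWhile PySem.Chars.isdigit,
       j + ((row.drop j).takeWhile PySem.Chars.isdigit).length) :=
  gndInner_eq_fuel row (row.length - j) j (by omega) num

theorem foldl_append_range' (r v : Int) (i : Nat) : ∀ (n : Nat) (d : List (Int × Int × Int)),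
    (List.range' i n).foldl (fun acc c_ii => acc ++ [(r, ((c_ii : Int)), v)]) d =
      (List.range n).foldl (fun acc k => acc ++ [(r, (((i + k : Nat) : Int)), v)]) d := by
  intro n
  induction n with
  | zero => intro d; rfl
  | succ n ihn =>
    intro d
    rw [List.range'_concat, List.range_succ]
    have e : i + 1 * n = i + n := by ring
    rw [e]
    rw [show (do let a ← (List.range' i n ++ [i + n]); pure ((a : Int)) : List Int)
        = (do let a ← List.range' i n; pure ((a : Int))) ++ [((i + n : Nat) : Int)] from by simp]
    rw [List.foldl_append, List.foldl_append, ihn]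
    simp

-- non-digit head: B just advances the column by one (the group either is the singleton [c]
-- or merges with a following non-digit run; the resulting state is the same)
theorem gndRowB_nondigit (r : Int) (c : Char) (rest : List Char) (col : Nat)
    (d : List (Int × Int × Int)) (hc : PySem.Chars.isdigit c = false) :
    gndRowB r (gndGroups (c :: rest)) col d = gndRowB r (gndGroups rest) (col + 1) d := by
  match rest with
  | [] => simp [gndGroups, gndRowB, hc]
  | x :: rs =>
    by_cases hx : PySem.Chars.isdigit x
    · simp [gndGroups, gndRowB, hc, hx]
    · have hx' : PySem.Chars.isdigit x = false := by simpa using hx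
      simp [gndGroups, gndRowB, hc, hx']
      have e : col + ((List.takeWhile (fun y => !PySem.Chars.isdigit y) rs).length + 1 + 1)
          = col + 1 + ((List.takeWhile (fun y => !PySem.Chars.isdigit y) rs).length + 1) := by
        omega
      rw [e]

theorem gndLoop_eq (row : List Char) (r : Int) :
    ∀ (n i : Nat), row.length - i ≤ n → ∀ d,
      gndLoop row r i d = gndRowB r (gndGroups (row.drop i)) i d := by
  intro n
  induction n with
  | zero =>
    intro i h d
    have hi : ¬ i < row.length := by omega
    rw [gndLoop]
    simp [hi, List.drop_eq_nil_of_le (by omega : row.length ≤ i), gndGroups, gndRowB]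
  | succ n ih =>
    intro i h d
    by_cases hi : i < row.length
    · have hdrop : row.drop i = row[i] :: row.drop (i + 1) := List.drop_eq_getElem_cons hi
      rw [gndLoop]
      by_cases hd : PySem.Chars.isdigit row[i]
      · -- digit run
        simp only [dif_pos hi, if_pos hd, gndInner_eq, List.nil_append]
        set tw' := (row.drop (i + 1)).takeWhile PySem.Chars.isdigit with htw'
        have htw : (row.drop i).takeWhile PySem.Chars.isdigit = row[i] :: tw' := by
          rw [hdrop, List.takeWhile_cons, if_pos hd]
        have hdw : (row.drop (i + 1)).dropWhile PySem.Chars.isdigit = row.drop (i + 1 + tw'.length) := by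
          have h1 : (row.drop (i + 1)).drop tw'.length
              = (row.drop (i + 1)).dropWhile PySem.Chars.isdigit := by
            conv_lhs => rw [← List.takeWhile_append_dropWhile
              (p := PySem.Chars.isdigit) (l := row.drop (i + 1)), ← htw']
            exact List.drop_left
          rw [← h1, List.drop_drop]
        rw [htw]
        simp only [List.length_cons, Nat.add_sub_cancel_left]
        rw [ih (i + (tw'.length + 1) + 1) (by omega)]
        rw [hdrop]
        simp only [gndGroups, hd, beq_true_eq]
        rw [← htw']
        simp only [gndRowB, if_true, hdw, List.length_cons]
        rw [← foldl_append_range' r (((PySem.Int.ofChars? (row[i] :: tw')).getD 0 : Int)) i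
          (tw'.length + 1) d]
        have e0 : i + (tw'.length + 1) = i + 1 + tw'.length := by omega
        rw [e0]
        by_cases hj : i + 1 + tw'.length < row.length
        · have hne : (row.drop (i + 1)).dropWhile PySem.Chars.isdigit ≠ [] := by
            rw [hdw]
            intro hcontra
            have hlen := congrArg List.length hcontra
            simp [List.length_drop] at hlen
            omega
          have hnd : PySem.Chars.isdigit row[i + 1 + tw'.length] = false := by
            have h2 := List.head_dropWhile_not PySem.Chars.isdigit hne
            rw [List.head_eq_getElem] at h2
            simpa [hdw, List.getElem_drop] using h2
          rw [List.drop_eq_getElem_cons hj]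
          rw [gndRowB_nondigit _ _ _ _ _ hnd]
        · rw [List.drop_eq_nil_of_le (by omega : row.length ≤ i + 1 + tw'.length),
            List.drop_eq_nil_of_le (by omega : row.length ≤ i + 1 + tw'.length + 1)]
          simp [gndGroups, gndRowB]
      · simp only [dif_pos hi, if_neg hd]
        rw [ih (i + 1) (by omega) d, hdrop,
          gndRowB_nondigit r row[i] (row.drop (i + 1)) i d (by simpa using hd)]
    · rw [gndLoop]
      simp [hi, List.drop_eq_nil_of_le (by omega : row.length ≤ i), gndGroups, gndRowB]

theorem row_eq (row : List Char) (r : Int) (d : List (Int × Int × Int)) :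
    gndLoop row r 0 d = gndRowB r (gndGroups row) 0 d := by
  simpa using gndLoop_eq row r row.length 0 (by omega) d

theorem generate_num_dict_spec : Claim_equal_generate_num_dict := by
  intro grid _
  unfold Spec_generate_num_dict generate_num_dict generate_num_dict_alt
  have : (fun (d : List (Int × Int × Int)) (p : Int × String) => gndLoop p.2.toList p.1 0 d)
       = (fun d p => gndRowB p.1 (gndGroups p.2.toList) 0 d) := by
    funext d p; exact row_eq _ _ _
  rw [this]
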